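-- pv_equiv track=rewrite | github.com/trufflesprouts/cornell-tech | hw1/problems/challenge/challenge_analysis.py | _int_to_bits_msb
-- ===== SOURCE A (Python) =====
-- def _int_to_bits_msb(n):
--     if n == 0:
--         return [0]
--     out = []
--     while n:
--         out.append(n & 1)
--         n >>= 1
--     return list(reversed(out))
-- ===== SOURCE B (Python) =====
-- def _int_to_bits_msb(n):
--     length = n.bit_length() or 1
--     return [(n >> i) & 1 for i in reversed(range(length))]
-- ===== Notes on version B (the rewrite author's own statement) =====
-- stated objective: simpler
-- what changed: B computes the bit count with n.bit_length() and extracts bits MSB-first by shifting, instead of A's mutate-n LSB-accumulate loop plus a final reversal.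
import Mathlib
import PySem

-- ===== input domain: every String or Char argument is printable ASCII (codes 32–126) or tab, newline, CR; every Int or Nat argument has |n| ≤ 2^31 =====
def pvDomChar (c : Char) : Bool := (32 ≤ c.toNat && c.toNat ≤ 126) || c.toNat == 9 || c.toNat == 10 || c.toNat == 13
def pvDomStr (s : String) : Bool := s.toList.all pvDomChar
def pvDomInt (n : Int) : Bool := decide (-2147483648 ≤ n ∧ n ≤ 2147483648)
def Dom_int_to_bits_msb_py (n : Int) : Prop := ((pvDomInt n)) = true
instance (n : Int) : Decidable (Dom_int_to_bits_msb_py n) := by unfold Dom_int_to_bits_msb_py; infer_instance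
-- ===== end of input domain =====

-- B replaces A's mutate-and-reverse while-loop by bit_length() plus direct MSB-first bit
-- extraction by shift position (objective: simpler); same values on Pre_ (0 ≤ n).

-- ===== PORT A =====
-- A's while-loop; the loop variable n is tracked as a Nat (Pre_ excludes n < 0, where the
-- Python loop never terminates, so the 'while n' test is 'm ≠ 0' here).
def aLoopA (m : Nat) (out : List Int) : List Int :=
  if m = 0 then out
  else aLoopA (m >>> 1) (out ++ [((m &&& 1 : Nat) : Int)])   -- out.append(n & 1); n >>= 1
termination_by m
decreasing_by simpa [Nat.shiftRight_one] using Nat.div_lt_self (Nat.pos_of_ne_zero (by assumption)) one_lt_two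

def int_to_bits_msb_py (n : Int) : List Int :=
  if n = 0 then [0]
  else (aLoopA n.toNat []).reverse                            -- list(reversed(out))

-- ===== PORT B =====
-- length = n.bit_length() or 1  (bit_length of n ≥ 0 is Nat.size n.toNat);
-- [(n >> i) & 1 for i in reversed(range(length))]
def int_to_bits_msb_py_alt (n : Int) : List Int :=
  let length : Nat := if n.toNat.size = 0 then 1 else n.toNat.size
  (List.range length).reverse.map (fun (i : Nat) => Int.land (n >>> (i : Int)) 1)

-- ===== PRECONDITION & SPEC =====
-- Pre_ excludes negative n: there A's 'while n' loop never terminates (n >>= 1 stalls at -1),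
-- so A returns no value; B returns the bits of |n| there.
def Pre_int_to_bits_msb_py (n : Int) : Prop := 0 ≤ n
instance (n : Int) : Decidable (Pre_int_to_bits_msb_py n) := by unfold Pre_int_to_bits_msb_py; infer_instance
def pvWitness_int_to_bits_msb_py : Int := 6

def Spec_int_to_bits_msb_py (n : Int) (out : List Int) : Prop := out = int_to_bits_msb_py_alt n
instance (n : Int) (out : List Int) : Decidable (Spec_int_to_bits_msb_py n out) := by unfold Spec_int_to_bits_msb_py; infer_instance

-- ===== CLAIM (what is proved, stated in full; the proofs are below) =====
def Claim_equal_int_to_bits_msb_py : Prop := ∀ (n : Int), Dom_int_to_bits_msb_py n → Pre_int_to_bits_msb_py n → Spec_int_to_bits_msb_py n (int_to_bits_msb_py n)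

-- ===== LEMMAS AND PROOFS =====

-- LSB-first bit list, the value A's loop accumulates.
def bitsL (m : Nat) : List Int :=
  if m = 0 then [] else ((m &&& 1 : Nat) : Int) :: bitsL (m >>> 1)
termination_by m
decreasing_by simpa [Nat.shiftRight_one] using Nat.div_lt_self (Nat.pos_of_ne_zero (by assumption)) one_lt_two

theorem aLoopA_eq (m : Nat) : ∀ out, aLoopA m out = out ++ bitsL m := by
  induction m using Nat.strong_induction_on with
  | _ m ih =>
    intro out
    rw [aLoopA, bitsL]
    by_cases h : m = 0
    · simp [h]
    · have hlt : m >>> 1 < m := by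
        simpa [Nat.shiftRight_one] using Nat.div_lt_self (Nat.pos_of_ne_zero h) one_lt_two
      simp [h, ih _ hlt]

theorem size_shiftRight_one (m : Nat) (h : m ≠ 0) : m.size = (m >>> 1).size + 1 := by
  conv_lhs => rw [← Nat.bit_testBit_zero_shiftRight_one m]
  rw [Nat.size_bit (by rw [Nat.bit_testBit_zero_shiftRight_one]; exact h)]

theorem bitsL_eq (m : Nat) :
    bitsL m = (List.range m.size).map (fun i => (((m >>> i) &&& 1 : Nat) : Int)) := by
  induction m using Nat.strong_induction_on with
  | _ m ih =>
    rw [bitsL]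
    by_cases h : m = 0
    · simp [h]
    · have hlt : m >>> 1 < m := by
        simpa [Nat.shiftRight_one] using Nat.div_lt_self (Nat.pos_of_ne_zero h) one_lt_two
      rw [size_shiftRight_one m h, List.range_succ_eq_map]
      simp only [h, if_false, List.map_cons, List.map_map, ih _ hlt]
      refine List.cons_eq_cons.mpr ⟨by simp, List.map_congr_left ?_⟩
      intro i _
      simp only [Function.comp_apply, Nat.succ_eq_add_one]
      rw [show i + 1 = 1 + i from Nat.add_comm i 1, Nat.shiftRight_add]

theorem int_land_cast (a : Nat) : Int.land ((a : Int)) 1 = ((a &&& 1 : Nat) : Int) := by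
  show Int.land (Int.ofNat a) (Int.ofNat 1) = Int.ofNat (a &&& 1)
  simp [Int.land]

-- ===== VERDICT (by name: the statement is the Claim_ definition above) =====
theorem int_to_bits_msb_py_spec : Claim_equal_int_to_bits_msb_py := by
  intro n _ hpre
  unfold Spec_int_to_bits_msb_py
  obtain ⟨m, rfl⟩ := Int.eq_ofNat_of_zero_le hpre
  unfold int_to_bits_msb_py int_to_bits_msb_py_alt
  by_cases h : m = 0
  · subst h; decide
  · have hm : ((m : Int)) ≠ 0 := by exact_mod_cast h
    have hsz : m.size ≠ 0 := by simpa [Nat.size_eq_zero] using h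
    rw [if_neg hm]
    simp only [Int.toNat_natCast]
    rw [if_neg hsz, aLoopA_eq, List.nil_append, bitsL_eq, ← List.map_reverse]
    apply List.map_congr_left
    intro i _
    rw [Int.shiftRight_natCast, int_land_cast]
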